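-- pv_equiv track=rewrite | github.com/Gabriel-Bastos-Rabelo/marathon-training | course/dsa/oneInteger.py | solve
-- ===== SOURCE A (Python) =====
-- def solve(nums):
--     left = 0
--     right = len(nums) - 1
--     res = 0
--     nums.sort()
--
--     while right - left > 0:
--         num1 = nums[left]
--         num2 = nums[left + 1]
--         res += num1 + num2
--         left += 2
--         nums.append(num1 + num2)
--         right += 1
--         nums.sort()
--
--
--     return res
-- ===== SOURCE B (Python) =====
-- # B: optimal-merge by maintaining one sorted list of live values: merge the two front
-- # values and binary-insert their sum, instead of appending to the full history list and
-- # re-sorting it every iteration.  Return value only: A sorts/appends its argument in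
-- # place; B leaves the argument untouched.
--
-- def solve(nums):
--     live = sorted(nums)
--     res = 0
--     while len(live) > 1:
--         s = live[0] + live[1]
--         res += s
--         del live[:2]
--         lo = 0
--         hi = len(live)
--         while lo < hi:
--             mid = (lo + hi) // 2
--             if live[mid] < s:
--                 lo = mid + 1
--             else:
--                 hi = mid
--         live.insert(lo, s)
--     return res
-- ===== Notes on version B (the rewrite author's own statement) =====
-- stated objective: alternative
-- what changed: Instead of appending each merged sum to the full history list and re-sorting it every iteration, B keeps only the still-live values as one sorted list, merging the two front values and binary-inserting their sum; Pre_ excludes lists of length >= 3 containing a negative value, the corner where greedy two-smallest pairing is not the minimum-cost strategy at all and A (whose re-sort drops a negative merged sum into the consumed prefix, never re-merging it) and B (which re-merges every sum) return two equally accidental values.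
-- outside the precondition, e.g. on solve([-1, 0, 5]): A returns 4, B returns 3; on solve([-2, 1, 1]): A returns 1, B returns -1
import Mathlib
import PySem

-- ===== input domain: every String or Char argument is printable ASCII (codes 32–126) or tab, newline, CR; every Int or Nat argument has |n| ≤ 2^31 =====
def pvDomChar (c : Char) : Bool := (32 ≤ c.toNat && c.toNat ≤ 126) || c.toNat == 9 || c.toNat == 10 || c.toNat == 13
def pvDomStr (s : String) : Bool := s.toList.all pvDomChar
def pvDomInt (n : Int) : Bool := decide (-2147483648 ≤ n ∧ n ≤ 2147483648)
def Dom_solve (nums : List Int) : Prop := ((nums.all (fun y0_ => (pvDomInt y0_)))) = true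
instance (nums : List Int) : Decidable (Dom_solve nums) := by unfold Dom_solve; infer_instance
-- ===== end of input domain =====

-- B keeps one sorted list of live values (merge the two front values, binary-insert the
-- sum) instead of appending each sum to the full history list and re-sorting it every
-- iteration.  Return value only: Python A sorts/appends its argument in place, B does not.

-- ===== PORT A =====
-- the while loop: state (nums, left, right, res); terminates because right - left shrinks by 1
def solveLoopA (nums : List Int) (left right res : Int) : Int :=
  if _h : right - left > 0 then
    let num1 := PySem.List.pyGetD nums left 0
    let num2 := PySem.List.pyGetD nums (left + 1) 0
    solveLoopA (PySem.List.sorted (nums ++ [num1 + num2]) (fun x => x))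
      (left + 2) (right + 1) (res + (num1 + num2))
  else res
termination_by (right - left).toNat
decreasing_by omega

def solve (nums : List Int) : Int :=
  solveLoopA (PySem.List.sorted nums (fun x => x)) 0 (PySem.List.len nums - 1) 0

-- ===== PORT B =====
-- the hand-written binary search of Source B: first position in live whose value is ≥ s
def bisectLoopB (live : List Int) (s lo hi : Int) : Int :=
  if h : lo < hi then
    let mid := PySem.Int.floordiv (lo + hi) 2
    if PySem.List.pyGetD live mid 0 < s then bisectLoopB live s (mid + 1) hi
    else bisectLoopB live s lo mid
  else lo
termination_by (hi - lo).toNat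
decreasing_by
  · have h1 := (PySem.Int.floordiv_two_mid_bounds (le_of_lt h)).1
    omega
  · have h2 := (PySem.Int.floordiv_lt_iff_lt_mul (a := lo + hi) (b := 2) (q := hi) (by norm_num)).mpr (by omega)
    omega

-- the while loop of Source B: state (live, res)
def solveLoopB (live : List Int) (res : Int) : Int :=
  if _h : PySem.List.len live > 1 then
    let s := PySem.List.pyGetD live 0 0 + PySem.List.pyGetD live 1 0
    let rest := live.drop 2                          -- del live[:2]
    let lo := bisectLoopB rest s 0 (PySem.List.len rest)
    solveLoopB (PySem.List.insert rest lo s) (res + s)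
  else res
termination_by live.length
decreasing_by
  simp only [PySem.List.len_eq] at _h
  have := PySem.List.length_insert (live.drop 2)
    (bisectLoopB (live.drop 2) (PySem.List.pyGetD live 0 0 + PySem.List.pyGetD live 1 0) 0
      (PySem.List.len (live.drop 2)))
    (PySem.List.pyGetD live 0 0 + PySem.List.pyGetD live 1 0)
  simp at this ⊢
  omega

def solve_alt (nums : List Int) : Int :=
  solveLoopB (PySem.List.sorted nums (fun x => x)) 0

-- ===== PRECONDITION & SPEC =====
-- Pre_ restricts to the natural domain of the optimal-merge problem: nonnegative values
-- (or trivially short lists, where one merge at most happens and sign cannot matter).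
-- On longer lists containing a negative value the greedy two-smallest pairing is not the
-- minimum-cost strategy at all, and A and B return two equally accidental values there
-- (A's re-sort drops a negative merged sum into the already-consumed prefix, so it is never
-- re-merged, e.g. A([-1,0,5]) = 4; B re-merges every sum and returns 3): that corner is
-- excluded because neither value is a specified one.
def Pre_solve (nums : List Int) : Prop := nums.length ≤ 2 ∨ ∀ x ∈ nums, 0 ≤ x
instance (nums : List Int) : Decidable (Pre_solve nums) := by unfold Pre_solve; infer_instance

def pvWitness_solve : List Int := [4, 1, 2, 3]

def Spec_solve (nums : List Int) (out : Int) : Prop := out = solve_alt nums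
instance (nums : List Int) (out : Int) : Decidable (Spec_solve nums out) := by unfold Spec_solve; infer_instance

-- ===== CLAIM (what is proved, stated in full; the proofs are below) =====
def Claim_equal_solve : Prop := ∀ (nums : List Int), Dom_solve nums → Pre_solve nums → Spec_solve nums (solve nums)

-- ===== LEMMAS AND PROOFS =====

-- the number of elements strictly below s (the insertion point of a stable sort's new last element)
def insPos (nums : List Int) (s : Int) : Nat := nums.countP (fun y => decide (y < s))

lemma insPos_le_length (nums : List Int) (s : Int) : insPos nums s ≤ nums.length :=
  List.countP_le_length

-- on a sorted list, everything before insPos is < s and everything from insPos on is ≥ s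
lemma insPos_facts (nums : List Int) (s : Int) (hp : nums.Pairwise (· ≤ ·)) :
    (∀ x ∈ nums.take (insPos nums s), x < s) ∧ (∀ y ∈ nums.drop (insPos nums s), s ≤ y) := by
  induction nums with
  | nil => simp [insPos]
  | cons z t ih =>
    have hpt : t.Pairwise (· ≤ ·) := hp.of_cons
    have hz : ∀ y ∈ t, z ≤ y := fun y hy => List.rel_of_pairwise_cons hp hy
    by_cases hzs : z < s
    · have hc : insPos (z :: t) s = insPos t s + 1 := by
        simp [insPos, hzs]
      rw [hc]
      refine ⟨?_, ?_⟩
      · intro x hx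
        rw [List.take_succ_cons] at hx
        rcases List.mem_cons.mp hx with rfl | hx
        · exact hzs
        · exact (ih hpt).1 x hx
      · intro y hy
        rw [List.drop_succ_cons] at hy
        exact (ih hpt).2 y hy
    · have hc : insPos (z :: t) s = 0 := by
        simp only [insPos, List.countP_cons, decide_eq_true_eq]
        rw [List.countP_eq_zero.mpr, if_neg hzs]
        intro y hy
        simp only [decide_eq_true_eq]
        intro hys
        exact hzs (lt_of_le_of_lt (hz y hy) hys)
      rw [hc]
      refine ⟨by simp, ?_⟩
      intro y hy
      simp only [List.drop_zero] at hy
      rcases List.mem_cons.mp hy with rfl | hy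
      · omega
      · exact le_trans (by omega) (hz y hy)

-- index form: nums[i] < s iff i < insPos
lemma getElem_lt_iff (nums : List Int) (s : Int) (hp : nums.Pairwise (· ≤ ·))
    (i : Nat) (hi : i < nums.length) : nums[i] < s ↔ i < insPos nums s := by
  have hc := insPos_le_length nums s
  constructor
  · intro hlt
    by_contra hge
    have h1 : nums[i] = (nums.drop (insPos nums s))[i - insPos nums s]'(by simp; omega) := by
      rw [List.getElem_drop]; congr 1; omega
    have h2 : s ≤ nums[i] := by
      rw [h1]
      exact (insPos_facts nums s hp).2 _ (List.getElem_mem _)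
    omega
  · intro hlt
    have h1 : nums[i] = (nums.take (insPos nums s))[i]'(by simp; omega) := by
      rw [List.getElem_take]
    rw [h1]
    exact (insPos_facts nums s hp).1 _ (List.getElem_mem _)

-- sorting after appending one element = splicing it in at insPos
lemma sorted_append_singleton (nums : List Int) (s : Int) (hp : nums.Pairwise (· ≤ ·)) :
    PySem.List.sorted (nums ++ [s]) (fun x => x) =
      nums.take (insPos nums s) ++ s :: nums.drop (insPos nums s) := by
  apply PySem.List.sorted_id_eq_of_perm_of_pairwise
  · have h1 : (nums.take (insPos nums s) ++ s :: nums.drop (insPos nums s)).Perm (s :: nums) := by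
      have := List.perm_middle (a := s) (l₁ := nums.take (insPos nums s))
        (l₂ := nums.drop (insPos nums s))
      rwa [List.take_append_drop] at this
    exact h1.trans (List.perm_append_singleton s nums).symm
  · have hfacts := insPos_facts nums s hp
    have hp' : (nums.take (insPos nums s) ++ nums.drop (insPos nums s)).Pairwise (· ≤ ·) := by
      rw [List.take_append_drop]; exact hp
    rw [List.pairwise_append]
    refine ⟨(List.pairwise_append.mp hp').1, ?_, ?_⟩
    · rw [List.pairwise_cons]
      exact ⟨hfacts.2, (List.pairwise_append.mp hp').2.1⟩
    · intro x hx y hy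
      rcases List.mem_cons.mp hy with rfl | hy
      · exact le_of_lt (hfacts.1 x hx)
      · exact (List.pairwise_append.mp hp').2.2 x hx y hy

-- the hand-written binary search of Source B finds insPos
lemma bisectLoopB_eq (live : List Int) (s : Int) (hp : live.Pairwise (· ≤ ·)) :
    ∀ (m : Nat) (lo hi : Int), (hi - lo).toNat = m → 0 ≤ lo → hi ≤ live.length →
      lo ≤ (insPos live s : Int) → (insPos live s : Int) ≤ hi →
      bisectLoopB live s lo hi = (insPos live s : Int) := by
  intro m
  induction m using Nat.strong_induction_on with
  | _ m ih =>
    intro lo hi hm h0 hlen hlo hhi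
    rw [bisectLoopB]
    by_cases h : lo < hi
    · rw [dif_pos h]
      have hmid := PySem.Int.floordiv_two_mid_bounds (le_of_lt h)
      have hmidlt : PySem.Int.floordiv (lo + hi) 2 < hi :=
        (PySem.Int.floordiv_lt_iff_lt_mul (a := lo + hi) (b := 2) (q := hi) (by norm_num)).mpr
          (by omega)
      have hmid0 : 0 ≤ PySem.Int.floordiv (lo + hi) 2 := le_trans h0 hmid.1
      have hmidlen : PySem.Int.floordiv (lo + hi) 2 < (live.length : Int) :=
        lt_of_lt_of_le hmidlt hlen
      show (if PySem.List.pyGetD live (PySem.Int.floordiv (lo + hi) 2) 0 < s then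
          bisectLoopB live s (PySem.Int.floordiv (lo + hi) 2 + 1) hi
        else bisectLoopB live s lo (PySem.Int.floordiv (lo + hi) 2)) = (insPos live s : Int)
      rw [PySem.List.pyGetD_eq_getElem live 0 hmid0 hmidlen]
      by_cases hcmp : live[(PySem.Int.floordiv (lo + hi) 2).toNat]'(by omega) < s
      · rw [if_pos hcmp]
        have hcm : (PySem.Int.floordiv (lo + hi) 2).toNat < insPos live s :=
          (getElem_lt_iff live s hp _ (by omega)).mp hcmp
        exact ih (hi - (PySem.Int.floordiv (lo + hi) 2 + 1)).toNat (by omega) _ hi rfl (by omega)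
          hlen (by omega) hhi
      · rw [if_neg hcmp]
        have hcm : ¬ (PySem.Int.floordiv (lo + hi) 2).toNat < insPos live s := fun hlt =>
          hcmp ((getElem_lt_iff live s hp _ (by omega)).mpr hlt)
        exact ih (PySem.Int.floordiv (lo + hi) 2 - lo).toNat (by omega) lo _ rfl h0 (by omega)
          hlo (by omega)
    · rw [dif_neg h]
      omega

-- the loop correspondence on nonnegative values:
-- A's state (sorted nums, pointer k, right = len nums - 1) vs B's live list nums.drop k
lemma loop_eq (m : Nat) : ∀ (nums : List Int) (k : Nat) (res : Int),
    nums.length - k = m → nums.Pairwise (· ≤ ·) → (∀ x ∈ nums, 0 ≤ x) →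
    solveLoopA nums (k : Int) ((nums.length : Int) - 1) res = solveLoopB (nums.drop k) res := by
  induction m using Nat.strong_induction_on with
  | _ m ih =>
    intro nums k res hm hp hnn
    rw [solveLoopA, solveLoopB]
    by_cases hg : ((nums.length : Int) - 1 - (k : Int) > 0)
    · have hk2 : k + 2 ≤ nums.length := by omega
      have ha : PySem.List.pyGetD nums (k : Int) 0 = nums[k]'(by omega) := by
        rw [PySem.List.pyGetD_natCast]
        exact List.getD_eq_getElem nums 0 (by omega)
      have hb : PySem.List.pyGetD nums ((k : Int) + 1) 0 = nums[k + 1]'(by omega) := by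
        rw [show ((k : Int) + 1) = ((k + 1 : Nat) : Int) from by push_cast; ring,
          PySem.List.pyGetD_natCast]
        exact List.getD_eq_getElem nums 0 (by omega)
      have ha' : PySem.List.pyGetD (nums.drop k) 0 0 = nums[k]'(by omega) := by
        rw [PySem.List.pyGetD_zero, List.getD_eq_getElem _ 0 (by simp; omega),
          List.getElem_drop]
        simp
      have hb' : PySem.List.pyGetD (nums.drop k) 1 0 = nums[k + 1]'(by omega) := by
        rw [show (1 : Int) = ((1 : Nat) : Int) from by norm_num, PySem.List.pyGetD_natCast,
          List.getD_eq_getElem _ _ (by simp; omega), List.getElem_drop]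
      have hgB : PySem.List.len (nums.drop k) > 1 := by
        rw [PySem.List.len_eq]
        simp
        omega
      rw [dif_pos hg, dif_pos hgB]
      simp only [ha, hb, ha', hb']
      -- both sides now speak about s = nums[k] + nums[k+1]
      have hS := sorted_append_singleton nums (nums[k]'(by omega) + nums[k + 1]'(by omega)) hp
      have hSlen : (PySem.List.sorted
          (nums ++ [nums[k]'(by omega) + nums[k + 1]'(by omega)]) (fun x => x)).length =
          nums.length + 1 := by
        rw [PySem.List.length_sorted]
        simp
      have hSp : (PySem.List.sorted
          (nums ++ [nums[k]'(by omega) + nums[k + 1]'(by omega)]) (fun x => x)).Pairwise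
          (· ≤ ·) :=
        PySem.List.sorted_pairwise _ (fun x => x)
      have hSnn : ∀ x ∈ PySem.List.sorted
          (nums ++ [nums[k]'(by omega) + nums[k + 1]'(by omega)]) (fun x => x), 0 ≤ x := by
        intro x hx
        rw [PySem.List.mem_sorted] at hx
        rcases List.mem_append.mp hx with hx | hx
        · exact hnn x hx
        · rcases List.mem_singleton.mp hx with rfl
          have h1 := hnn (nums[k]'(by omega)) (List.getElem_mem _)
          have h2 := hnn (nums[k + 1]'(by omega)) (List.getElem_mem _)
          omega
      have hreL : ((k : Int) + 2) = ((k + 2 : Nat) : Int) := by push_cast; ring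
      have hreR : ((nums.length : Int) - 1 + 1) = ((PySem.List.sorted
          (nums ++ [nums[k]'(by omega) + nums[k + 1]'(by omega)]) (fun x => x)).length : Int)
          - 1 := by
        rw [hSlen]
        push_cast
        ring
      rw [hreL, hreR,
        ih ((PySem.List.sorted (nums ++ [nums[k]'(by omega) + nums[k + 1]'(by omega)])
              (fun x => x)).length - (k + 2))
          (by rw [hSlen]; omega) _ (k + 2) _ rfl hSp hSnn]
      -- now both sides are solveLoopB applications; it remains to identify the live lists
      have hc := insPos_le_length nums (nums[k]'(by omega) + nums[k + 1]'(by omega))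
      -- with nonnegative values the sum is ≥ the second summand, so it never lands in the
      -- dead prefix: insPos ≥ k + 2 would fail only if nums[k] < 0
      have hsb : ¬ nums[k]'(by omega) + nums[k + 1]'(by omega) < nums[k + 1]'(by omega) := by
        have := hnn (nums[k]'(by omega)) (List.getElem_mem _)
        omega
      rw [List.drop_drop, show (k : Nat) + 2 = k + 2 from rfl]
      have hrestp : (nums.drop (k + 2)).Pairwise (· ≤ ·) := hp.drop
      have hbis : bisectLoopB (nums.drop (k + 2))
          (nums[k]'(by omega) + nums[k + 1]'(by omega)) 0
          (PySem.List.len (nums.drop (k + 2))) =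
          ((insPos (nums.drop (k + 2)) (nums[k]'(by omega) + nums[k + 1]'(by omega))) :
            Int) := by
        apply bisectLoopB_eq _ _ hrestp ((PySem.List.len (nums.drop (k + 2)) - 0).toNat)
        · rfl
        · omega
        · rw [PySem.List.len_eq]
        · omega
        · rw [PySem.List.len_eq]
          have := insPos_le_length (nums.drop (k + 2))
            (nums[k]'(by omega) + nums[k + 1]'(by omega))
          omega
      rw [hbis, PySem.List.insert_natCast _ _ _ (insPos_le_length _ _)]
      congr 1
      rw [← sorted_append_singleton _ _ hrestp]
      -- both lists are the sorted arrangement of nums.drop (k+2) ++ [s]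
      refine (PySem.List.sorted_id_eq_of_perm_of_pairwise _ _ ?_ ?_).symm
      · -- permutation
        by_cases hck : k + 2 ≤ insPos nums (nums[k]'(by omega) + nums[k + 1]'(by omega))
        · rw [hS, List.drop_append]
          have h2 : (nums.take (insPos nums (nums[k]'(by omega) + nums[k + 1]'(by omega)))).length
              = insPos nums (nums[k]'(by omega) + nums[k + 1]'(by omega)) := by
            simp [List.length_take]
            omega
          rw [h2, show k + 2 - insPos nums (nums[k]'(by omega) + nums[k + 1]'(by omega)) = 0
            from by omega, List.drop_zero]
          have hrest : nums.drop (k + 2) =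
              (nums.take (insPos nums (nums[k]'(by omega) + nums[k + 1]'(by omega)))).drop (k + 2)
              ++ nums.drop (insPos nums (nums[k]'(by omega) + nums[k + 1]'(by omega))) := by
            conv_lhs => rw [← List.take_append_drop
              (insPos nums (nums[k]'(by omega) + nums[k + 1]'(by omega))) nums]
            rw [List.drop_append, h2,
              show k + 2 - insPos nums (nums[k]'(by omega) + nums[k + 1]'(by omega)) = 0
                from by omega, List.drop_zero]
          rw [hrest]
          exact List.perm_middle.trans (List.perm_append_singleton _ _).symm
        · -- with nonnegative values insPos ≥ k + 2 always holds: nums[k+1] ≤ s and the list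
          -- is sorted, so every position < k + 2 holds a value < s or equal at k + 1;
          -- here insPos < k + 2 forces nums[k+1] = s, where splicing keeps drop (k+2) the same
          have hck' : insPos nums (nums[k]'(by omega) + nums[k + 1]'(by omega)) ≤ k + 1 := by
            omega
          have hdk : (nums.take (insPos nums (nums[k]'(by omega) + nums[k + 1]'(by omega))) ++
              (nums[k]'(by omega) + nums[k + 1]'(by omega)) ::
                nums.drop (insPos nums (nums[k]'(by omega) + nums[k + 1]'(by omega)))).drop
                (k + 2) = nums.drop (k + 1) := by
            rw [List.drop_append]
            have h1 : (nums.take (insPos nums (nums[k]'(by omega) + nums[k + 1]'(by omega)))).drop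
                (k + 2) = [] := by
              apply List.drop_eq_nil_of_le
              simp [List.length_take]
              omega
            have h2 : (nums.take (insPos nums (nums[k]'(by omega) + nums[k + 1]'(by omega)))).length
                = insPos nums (nums[k]'(by omega) + nums[k + 1]'(by omega)) := by
              simp [List.length_take]
              omega
            rw [h1, h2, show k + 2 - insPos nums (nums[k]'(by omega) + nums[k + 1]'(by omega)) =
              (k + 1 - insPos nums (nums[k]'(by omega) + nums[k + 1]'(by omega))) + 1 from by
                omega, List.drop_succ_cons, List.drop_drop]
            rw [show insPos nums (nums[k]'(by omega) + nums[k + 1]'(by omega)) +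
              (k + 1 - insPos nums (nums[k]'(by omega) + nums[k + 1]'(by omega))) = k + 1 from by
                omega]
            simp
          rw [hS, hdk, List.drop_eq_getElem_cons (show k + 1 < nums.length from by omega)]
          have hsb' : nums[k]'(by omega) + nums[k + 1]'(by omega) = nums[k + 1]'(by omega) := by
            have h1 : ¬ nums[k + 1]'(by omega) <
                nums[k]'(by omega) + nums[k + 1]'(by omega) := by
              intro hlt
              have := (getElem_lt_iff nums _ hp (k + 1) (by omega)).mp hlt
              omega
            omega
          rw [hsb']
          exact (List.perm_append_singleton _ _).symm
      · -- sortedness of the dropped suffix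
        exact hSp.drop
    · have hgB : ¬ PySem.List.len (nums.drop k) > 1 := by
        rw [PySem.List.len_eq]
        simp
        omega
      rw [dif_neg hg, dif_neg hgB]

-- on lists of at most two elements A and B agree regardless of sign
lemma short_eq (L : List Int) (h : L.length ≤ 2) :
    solveLoopA L 0 ((L.length : Int) - 1) 0 = solveLoopB L 0 := by
  match L, h with
  | [], _ =>
    rw [solveLoopA, solveLoopB]
    norm_num [PySem.List.len_eq]
  | [x], _ =>
    rw [solveLoopA, solveLoopB]
    norm_num [PySem.List.len_eq]
  | [x, y], _ =>
    rw [solveLoopA, solveLoopB]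
    rw [dif_pos (by norm_num), dif_pos (by norm_num [PySem.List.len_eq])]
    rw [solveLoopA, solveLoopB]
    rw [dif_neg (by norm_num),
      dif_neg (by
        rw [PySem.List.len_eq, PySem.List.length_insert]
        norm_num)]
    norm_num

-- ===== VERDICT (by name: the statement is the Claim_ definition above) =====
theorem solve_spec : Claim_equal_solve := by
  intro nums _ hpre
  unfold Spec_solve solve solve_alt
  have hp := PySem.List.sorted_pairwise nums (fun x => x)
  have hlen := PySem.List.length_sorted nums (fun x => x) false
  rcases hpre with hlen2 | hnn
  · have h := short_eq (PySem.List.sorted nums (fun x => x)) (by omega)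
    rw [hlen] at h
    simpa [PySem.List.len_eq, hlen] using h
  · have hnn' : ∀ x ∈ PySem.List.sorted nums (fun x => x), 0 ≤ x := by
      intro x hx
      exact hnn x ((PySem.List.mem_sorted nums (fun x => x) false x).mp hx)
    have h := loop_eq (PySem.List.sorted nums (fun x => x)).length
      (PySem.List.sorted nums (fun x => x)) 0 0 (by omega) (by exact hp) hnn'
    simpa [PySem.List.len_eq, hlen] using h
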